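-- pv_equiv track=rewrite | github.com/bellonet/xenium_zebrafish_registration | crop_per_fish_2d_slices.py | minimal_unique_suffixes
-- ===== SOURCE A (Python) =====
-- from typing import Tuple, List, Dict
--
-- def minimal_unique_suffixes(names: List[str]) -> List[str]:
--     if len(names) <= 1:
--         return [n[-3:] if len(n) >= 3 else n for n in names]
--
--     # Strip trailing slashes
--     names = [n.rstrip('/').rstrip('\\') for n in names]
--
--     for length in range(1, max(len(n) for n in names) + 1):
--         suffixes = [n[-length:] if len(n) >= length else n for n in names]
--         if len(set(suffixes)) == len(names):
--             return suffixes
--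
--     # Fallback: shouldn't happen unless there are duplicates
--     return names
-- ===== SOURCE B (Python) =====
-- from typing import List
--
-- def minimal_unique_suffixes(names: List[str]) -> List[str]:
--     if len(names) <= 1:
--         return [n[-3:] for n in names]
--
--     names = [n.rstrip('/').rstrip('\\') for n in names]
--
--     def suffixes(length):
--         return [n[-length:] if len(n) >= length else n for n in names]
--
--     def unique(length):
--         s = suffixes(length)
--         return len(set(s)) == len(s)
--
--     maxlen = max(len(n) for n in names)
--     if not unique(maxlen):
--         # duplicates remain even at full length
--         return names
--
--     # uniqueness is monotone in the suffix length: binary search the least one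
--     lo, hi = 1, maxlen
--     while lo < hi:
--         mid = (lo + hi) // 2
--         if unique(mid):
--             hi = mid
--         else:
--             lo = mid + 1
--     return suffixes(lo)
-- ===== Notes on version B (the rewrite author's own statement) =====
-- stated objective: faster
-- what changed: A scans candidate suffix lengths 1..maxlen linearly, rebuilding and set-testing the suffix list at every length; B exploits that uniqueness is monotone in the suffix length and binary-searches the minimal length, after one uniqueness test at full length to detect the duplicate fallback.
import Mathlib
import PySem

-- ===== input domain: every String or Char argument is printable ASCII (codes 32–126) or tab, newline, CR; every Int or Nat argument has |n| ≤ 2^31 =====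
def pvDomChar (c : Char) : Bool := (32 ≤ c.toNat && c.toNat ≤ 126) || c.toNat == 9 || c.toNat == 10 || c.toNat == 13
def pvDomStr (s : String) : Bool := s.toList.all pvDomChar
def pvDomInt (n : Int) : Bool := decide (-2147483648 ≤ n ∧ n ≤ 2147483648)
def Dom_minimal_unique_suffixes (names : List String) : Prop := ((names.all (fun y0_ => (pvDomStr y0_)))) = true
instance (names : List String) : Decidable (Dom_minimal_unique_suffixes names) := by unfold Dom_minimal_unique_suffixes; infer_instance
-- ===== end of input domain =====

-- B replaces A's linear scan over candidate suffix lengths by a binary search (uniqueness is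
-- monotone in the suffix length), keeping A's exact return value everywhere.

-- shared helper (the same line of Python appears in A and in B):
-- n.rstrip(c) for a single-character strip set: drop all trailing occurrences of c (exact)
def pvRstrip (c : Char) (cs : List Char) : List Char :=
  (cs.reverse.dropWhile (fun x => x == c)).reverse

-- n.rstrip('/').rstrip('\\')
def pvStrip (n : String) : String :=
  String.ofList (pvRstrip '\\' (pvRstrip '/' n.toList))

-- ===== PORT A =====

-- n[-3:] if len(n) >= 3 else n
def pvShort3A (n : String) : String :=
  if 3 ≤ n.toList.length then String.ofList (PySem.List.slice n.toList (some (-3)) none) else n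

-- the 'for length in range(1, max+1)' loop: first length whose suffixes are all distinct
def pvLoopA (names2 : List String) : List Int → List String
  | [] => names2
  | L :: rest =>
    let sufs := names2.map (fun n =>
      if L ≤ (n.toList.length : Int) then String.ofList (PySem.List.slice n.toList (some (-L)) none) else n)
    if (PySem.Set.ofList sufs).length = names2.length then sufs else pvLoopA names2 rest

def minimal_unique_suffixes (names : List String) : List String :=
  if names.length ≤ 1 then names.map pvShort3A
  else
    let names2 := names.map pvStrip
    match (PySem.List.max? (names2.map (fun n => n.toList.length)) (fun x => x) : Option Nat) with
    | none => names2  -- unreachable: names2 is nonempty here (max over an empty generator never happens)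
    | some maxlen => pvLoopA names2 (PySem.List.pyRange 1 ((maxlen : Int) + 1) 1)

-- ===== PORT B =====
-- suffixes(length): n[-length:] if len(n) >= length else n
def pvSufB (L : Nat) (n : String) : String :=
  if L ≤ n.toList.length then String.ofList (PySem.List.slice n.toList (some (-(L : Int))) none) else n

def pvSufsB (names2 : List String) (L : Nat) : List String := names2.map (pvSufB L)

-- unique(length): len(set(s)) == len(s)
def pvUniqueB (names2 : List String) (L : Nat) : Bool :=
  (PySem.Set.ofList (pvSufsB names2 L)).length == (pvSufsB names2 L).length

-- the 'while lo < hi' binary search; (lo+hi)/2 is Python's (lo+hi)//2 exactly (both arguments are nonnegative)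
def pvBsearchB (names2 : List String) (lo hi : Nat) : Nat :=
  if lo < hi then
    let mid := (lo + hi) / 2
    if pvUniqueB names2 mid then pvBsearchB names2 lo mid
    else pvBsearchB names2 (mid + 1) hi
  else lo
termination_by hi - lo
decreasing_by all_goals omega

def minimal_unique_suffixes_alt (names : List String) : List String :=
  if names.length ≤ 1 then
    names.map (fun n => String.ofList (PySem.List.slice n.toList (some (-3)) none))
  else
    let names2 := names.map pvStrip
    match PySem.List.max? (names2.map (fun n => n.toList.length)) (fun x => x) with
    | none => names2  -- unreachable: names2 is nonempty here
    | some maxlen =>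
      if pvUniqueB names2 maxlen then pvSufsB names2 (pvBsearchB names2 1 maxlen)
      else names2

-- ===== PRECONDITION & SPEC =====
def Spec_minimal_unique_suffixes (names : List String) (out : List String) : Prop := out = minimal_unique_suffixes_alt names
instance (names : List String) (out : List String) : Decidable (Spec_minimal_unique_suffixes names out) := by unfold Spec_minimal_unique_suffixes; infer_instance

-- ===== CLAIM (what is proved, stated in full; the proofs are below) =====
def Claim_equal_minimal_unique_suffixes : Prop := ∀ (names : List String), Dom_minimal_unique_suffixes names → Spec_minimal_unique_suffixes names (minimal_unique_suffixes names)

-- ===== LEMMAS AND PROOFS =====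

theorem pv_len_ofList_iff (xs : List String) :
    (PySem.Set.ofList xs).length = xs.length ↔ xs.Nodup := by
  constructor
  · intro h
    have hp : (PySem.Set.ofList xs).Perm xs.dedup := by
      refine (List.perm_ext_iff_of_nodup (PySem.Set.nodup_ofList xs) xs.nodup_dedup).mpr ?_
      intro a; rw [PySem.Set.mem_ofList, List.mem_dedup]
    have h2 : xs.dedup.length = xs.length := by rw [← hp.length_eq, h]
    have := List.Sublist.eq_of_length xs.dedup_sublist h2
    rw [← List.dedup_eq_self]; exact this
  · intro h; rw [PySem.Set.ofList_eq_self_of_nodup xs h]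

theorem pv_unique_iff (names2 : List String) (L : Nat) :
    pvUniqueB names2 L = true ↔ (pvSufsB names2 L).Nodup := by
  rw [pvUniqueB, beq_iff_eq, pv_len_ofList_iff]

-- A's per-element suffix expression at a Nat length is B's pvSufB
theorem pv_sufA_eq_sufB (L : Nat) (n : String) :
    (if (L : Int) ≤ (n.toList.length : Int) then
        String.ofList (PySem.List.slice n.toList (some (-(L : Int))) none) else n) = pvSufB L n := by
  simp [pvSufB]

theorem pv_loopA_cons (names2 : List String) (L : Nat) (rest : List Int) :
    pvLoopA names2 ((L : Int) :: rest) =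
      if pvUniqueB names2 L then pvSufsB names2 L else pvLoopA names2 rest := by
  show (let sufs := names2.map (fun n =>
      if (L : Int) ≤ (n.toList.length : Int) then String.ofList (PySem.List.slice n.toList (some (-(L : Int))) none) else n);
    if (PySem.Set.ofList sufs).length = names2.length then sufs else pvLoopA names2 rest) = _
  simp only [pv_sufA_eq_sufB]
  have hc : ((PySem.Set.ofList (names2.map (pvSufB L))).length = names2.length) ↔ pvUniqueB names2 L = true := by
    rw [pvUniqueB, beq_iff_eq, pvSufsB, List.length_map]
  by_cases h : pvUniqueB names2 L = true
  · rw [if_pos (hc.mpr h), h, if_pos rfl, pvSufsB]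
  · rw [if_neg (fun hx => h (hc.mp hx))]
    simp [h]

-- pvSufB L n = n when the name is no longer than L
theorem pv_sufB_of_le (L : Nat) (n : String) (h : n.toList.length ≤ L) : pvSufB L n = n := by
  rw [pvSufB]
  rcases Nat.eq_zero_or_pos L with h0 | hpos
  · subst h0
    simp at h
    simp [h, PySem.List.slice_zero_start, PySem.List.slice_none_none]
  · by_cases hle : L ≤ n.toList.length
    · rw [if_pos hle]
      rw [PySem.List.slice_from_neg_natCast _ _ hpos]
      have e : n.toList.length - L = 0 := by omega
      rw [e, List.drop_zero, String.ofList_toList]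
    · rw [if_neg hle]

-- last-L-characters decomposition: the L-suffix is a function of the (L+1)-suffix
theorem pv_sufB_decomp (L : Nat) (hL : 1 ≤ L) (n : String) :
    pvSufB L n = String.ofList (((pvSufB (L + 1) n).toList).drop ((pvSufB (L + 1) n).toList.length - L)) := by
  by_cases h1 : L + 1 ≤ n.toList.length
  · rw [pvSufB, if_pos (by omega), pvSufB, if_pos h1]
    rw [PySem.List.slice_from_neg_natCast _ _ (by omega), PySem.List.slice_from_neg_natCast _ _ (by omega)]
    rw [String.toList_ofList]
    rw [List.drop_drop, List.length_drop]
    congr 2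
    omega
  · by_cases h2 : L ≤ n.toList.length
    · rw [pvSufB, if_pos h2, pvSufB, if_neg h1]
      rw [PySem.List.slice_from_neg_natCast _ _ (by omega)]
    · rw [pvSufB, if_neg h2, pvSufB, if_neg (by omega)]
      have e : n.toList.length - L = 0 := by omega
      rw [e, List.drop_zero, String.ofList_toList]

theorem pv_mono (names2 : List String) (L : Nat) (hL : 1 ≤ L)
    (h : pvUniqueB names2 L = true) : pvUniqueB names2 (L + 1) = true := by
  rw [pv_unique_iff] at h ⊢
  have hmap : pvSufsB names2 L =
      (pvSufsB names2 (L + 1)).map (fun s => String.ofList (s.toList.drop (s.toList.length - L))) := by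
    rw [pvSufsB, pvSufsB, List.map_map]
    exact List.map_congr_left (fun n _ => pv_sufB_decomp L hL n)
  rw [hmap] at h
  exact h.of_map _

theorem pv_monoLe (names2 : List String) (L M : Nat) (hL : 1 ≤ L) (hLM : L ≤ M)
    (h : pvUniqueB names2 L = true) : pvUniqueB names2 M = true := by
  induction M, hLM using Nat.le_induction with
  | base => exact h
  | succ M hM ih => exact pv_mono names2 M (by omega) ih

def pvInts (l : List Nat) : List Int := l.map (fun a => (a : Int))

theorem pvInts_nil : pvInts [] = [] := rfl

theorem pvInts_cons (a : Nat) (l : List Nat) : pvInts (a :: l) = (a : Int) :: pvInts l := rfl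

theorem pvInts_append (l1 l2 : List Nat) : pvInts (l1 ++ l2) = pvInts l1 ++ pvInts l2 := by
  simp [pvInts]

-- range(1, m+1) is the casts of List.range' 1 m
theorem pv_range_cast (m : Nat) :
    PySem.List.pyRange 1 ((m : Int) + 1) 1 = pvInts (List.range' 1 m) := by
  induction m with
  | zero => rfl
  | succ m ih =>
    have hc : ((m + 1 : Nat) : Int) + 1 = (((m : Int) + 1)) + 1 := by push_cast; ring
    rw [hc, PySem.List.pyRange_one_succ_right (by omega), ih, List.range'_1_concat, pvInts_append,
      pvInts_cons, pvInts_nil]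
    have : ((1 + m : Nat) : Int) = (m : Int) + 1 := by push_cast; ring
    rw [this]

theorem pv_loopA_all_false (names2 : List String) :
    ∀ (k a : Nat), (∀ L, a ≤ L → L < a + k → pvUniqueB names2 L = false) →
      pvLoopA names2 (pvInts (List.range' a k)) = names2 := by
  intro k
  induction k with
  | zero => intro a _; rfl
  | succ k ih =>
    intro a h
    rw [List.range'_succ, pvInts_cons, pv_loopA_cons,
      if_neg (by rw [h a (le_refl a) (by omega)]; simp)]
    exact ih (a + 1) (fun L h1 h2 => h L (by omega) (by omega))

theorem pv_loopA_finds (names2 : List String)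
    (hQ : ∃ L, 1 ≤ L ∧ pvUniqueB names2 L = true) :
    ∀ (k a : Nat), 1 ≤ a → (∀ L, L < a → ¬ (1 ≤ L ∧ pvUniqueB names2 L = true)) →
      Nat.find hQ < a + k →
      pvLoopA names2 (pvInts (List.range' a k)) = pvSufsB names2 (Nat.find hQ) := by
  intro k
  induction k with
  | zero =>
    intro a _ hinv hlt
    exact absurd (Nat.find_spec hQ) (hinv _ (by omega))
  | succ k ih =>
    intro a ha hinv hlt
    rw [List.range'_succ, pvInts_cons, pv_loopA_cons]
    by_cases hA : pvUniqueB names2 a = true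
    · rw [if_pos hA]
      have hfind : Nat.find hQ = a := by
        refine le_antisymm (Nat.find_min' hQ ⟨ha, hA⟩) ?_
        by_contra hcon
        exact hinv (Nat.find hQ) (by omega) (Nat.find_spec hQ)
      rw [hfind]
    · rw [if_neg (by simp [hA])]
      refine ih (a + 1) (by omega) ?_ (by omega)
      intro L hL
      rcases Nat.lt_succ_iff_lt_or_eq.mp hL with h | h
      · exact hinv L h
      · subst h; exact fun hq => hA hq.2

theorem pv_bs_spec (names2 : List String) :
    ∀ (lo hi : Nat), 1 ≤ lo → lo ≤ hi → pvUniqueB names2 hi = true →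
      (pvUniqueB names2 (pvBsearchB names2 lo hi) = true ∧ lo ≤ pvBsearchB names2 lo hi ∧
        ∀ L, lo ≤ L → pvUniqueB names2 L = true → pvBsearchB names2 lo hi ≤ L) := by
  intro lo hi
  induction lo, hi using pvBsearchB.induct names2 with
  | case1 lo hi hlt mid hmid ih =>
    intro h1 hle hhi
    rw [pvBsearchB, if_pos hlt]
    rw [if_pos hmid]
    obtain ⟨hP, hge, hmin⟩ := ih h1 (by omega) hmid
    exact ⟨hP, hge, fun L hL hPL => hmin L hL hPL⟩
  | case2 lo hi hlt mid hmid ih =>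
    intro h1 hle hhi
    rw [pvBsearchB, if_pos hlt]
    rw [if_neg hmid,
      show pvBsearchB names2 ((lo + hi) / 2 + 1) hi = pvBsearchB names2 (mid + 1) hi from rfl]
    obtain ⟨hP, hge, hmin⟩ := ih (by omega) (by omega) hhi
    refine ⟨hP, by omega, fun L hL hPL => ?_⟩
    by_cases hcase : mid + 1 ≤ L
    · exact hmin L hcase hPL
    · exact absurd (pv_monoLe names2 L mid (by omega) (by omega) hPL) (by simp [hmid])
  | case3 lo hi hlt =>
    intro h1 hle hhi
    rw [pvBsearchB, if_neg hlt]
    have : lo = hi := by omega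
    subst this
    exact ⟨hhi, le_refl lo, fun L hL _ => hL⟩

theorem pv_maxlen_pos (names2 : List String) (maxlen : Nat)
    (hmax : PySem.List.max? (names2.map (fun n => n.toList.length)) (fun x => x) = some maxlen)
    (hlen : 2 ≤ names2.length) (hu : pvUniqueB names2 maxlen = true) : 1 ≤ maxlen := by
  by_contra h
  have hml : maxlen = 0 := by omega
  subst hml
  have hall : ∀ n ∈ names2, n.toList.length = 0 := by
    intro n hn
    have := PySem.List.max?_isMax hmax (n.toList.length) (List.mem_map_of_mem hn)
    omega
  have hnodup := (pv_unique_iff names2 0).mp hu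
  have hsufs : pvSufsB names2 0 = names2 := by
    rw [pvSufsB]
    rw [List.map_congr_left (fun n hn => pv_sufB_of_le 0 n (by rw [hall n hn]))]
    exact List.map_id names2
  rw [hsufs] at hnodup
  match names2, hlen, hall, hnodup with
  | a :: b :: t, _, hall, hnodup =>
    have ha : a = b := by
      have h1 : a.toList = [] := List.length_eq_zero_iff.mp (hall a (by simp))
      have h2 : b.toList = [] := List.length_eq_zero_iff.mp (hall b (by simp))
      have := congrArg String.ofList (h1.trans h2.symm)
      rwa [String.ofList_toList, String.ofList_toList] at this
    exact (List.nodup_cons.mp hnodup).1 (ha ▸ List.mem_cons_self)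

-- ===== VERDICT (by name: the statement is the Claim_ definition above) =====
theorem minimal_unique_suffixes_spec : Claim_equal_minimal_unique_suffixes := by
  intro names _
  show minimal_unique_suffixes names = minimal_unique_suffixes_alt names
  rw [minimal_unique_suffixes, minimal_unique_suffixes_alt]
  by_cases hlen : names.length ≤ 1
  · rw [if_pos hlen, if_pos hlen]
    refine List.map_congr_left (fun n _ => ?_)
    rw [pvShort3A]
    by_cases h3 : 3 ≤ n.toList.length
    · rw [if_pos h3]
    · rw [if_neg h3, PySem.List.slice_from_neg_ofNat n.toList 3 (by omega)]
      have e : n.toList.length - 3 = 0 := by omega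
      rw [e, List.drop_zero, String.ofList_toList]
  · rw [if_neg hlen, if_neg hlen]
    cases hmax : PySem.List.max? ((names.map pvStrip).map (fun n => n.toList.length)) (fun x => x) with
    | none => simp only [hmax]
    | some maxlen =>
      simp only [hmax]
      set names2 := names.map pvStrip with hnames2
      by_cases hu : pvUniqueB names2 maxlen = true
      · rw [if_pos hu]
        have h2 : 2 ≤ names2.length := by rw [hnames2, List.length_map]; omega
        have hml : 1 ≤ maxlen := pv_maxlen_pos names2 maxlen hmax h2 hu
        have hQ : ∃ L, 1 ≤ L ∧ pvUniqueB names2 L = true := ⟨maxlen, hml, hu⟩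
        have hfind_le : Nat.find hQ ≤ maxlen := Nat.find_min' hQ ⟨hml, hu⟩
        rw [pv_range_cast, pv_loopA_finds names2 hQ maxlen 1 (le_refl 1)
          (fun L hL hq => by omega) (by omega)]
        obtain ⟨hP, hge, hmin⟩ := pv_bs_spec names2 1 maxlen (le_refl 1) hml hu
        have : Nat.find hQ = pvBsearchB names2 1 maxlen := by
          refine le_antisymm (Nat.find_min' hQ ⟨hge, hP⟩) ?_
          exact hmin (Nat.find hQ) (Nat.find_spec hQ).1 (Nat.find_spec hQ).2
        rw [this]
      · rw [if_neg hu]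
        rw [pv_range_cast, pv_loopA_all_false names2 maxlen 1]
        intro L h1 hL
        cases hcase : pvUniqueB names2 L with
        | false => rfl
        | true => exact absurd (pv_monoLe names2 L maxlen h1 (by omega) hcase) hu
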